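-- pv_equiv track=rewrite | github.com/aniket-work/build_startup_using_AI_Agents | main.py | create_dummy_job_openings
-- ===== SOURCE A (Python) =====
-- def create_dummy_job_openings(num_jobs):
--     job_openings = {
--         "finance": [],
--         "tech": [],
--         "manufacturing": []
--     }
--     for i in range(num_jobs):
--         job = {
--             "title": f"Job {i+1}",
--             "company": f"Company {i+1}",
--             "location": f"Location {i+1}"
--         }
--         domain = ["finance", "tech", "manufacturing"][i % 3]
--         job_openings[domain].append(job)
--     return job_openings
-- ===== SOURCE B (Python) =====
-- def create_dummy_job_openings(num_jobs):
--     def make_job(i):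
--         return {
--             "title": f"Job {i+1}",
--             "company": f"Company {i+1}",
--             "location": f"Location {i+1}"
--         }
--     return {domain: [make_job(i) for i in range(idx, num_jobs, 3)]
--             for idx, domain in enumerate(["finance", "tech", "manufacturing"])}
-- ===== Notes on version B (the rewrite author's own statement) =====
-- stated objective: alternative
-- what changed: Builds the result as a dict comprehension making one strided range pass per domain (start at the domain's index, step by the number of domains) instead of a single interleaved loop over all indices dispatching each job into a pre-built dict via the index residue.
import Mathlib
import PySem

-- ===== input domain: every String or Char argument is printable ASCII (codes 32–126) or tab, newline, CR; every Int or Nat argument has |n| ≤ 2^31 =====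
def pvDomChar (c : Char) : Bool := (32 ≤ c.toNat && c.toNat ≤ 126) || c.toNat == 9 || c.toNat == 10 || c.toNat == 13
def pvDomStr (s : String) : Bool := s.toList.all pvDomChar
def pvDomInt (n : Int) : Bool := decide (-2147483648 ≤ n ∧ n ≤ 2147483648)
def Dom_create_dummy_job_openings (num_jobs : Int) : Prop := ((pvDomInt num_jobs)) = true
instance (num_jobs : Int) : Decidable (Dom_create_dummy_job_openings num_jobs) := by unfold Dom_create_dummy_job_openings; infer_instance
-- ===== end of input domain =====

-- B replaces A's single interleaved i % 3 dispatch loop with one strided range(idx, num_jobs, 3) pass per domain (alternative decomposition, same cost).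


-- ===== PORT A =====
def create_dummy_job_openings (num_jobs : Int) : List (String × List (List (String × String))) :=
  let job_openings : PySem.Dict String (List (List (String × String))) :=
    PySem.Dict.ofList [("finance", []), ("tech", []), ("manufacturing", [])]
  let final := (PySem.List.pyRange 0 num_jobs 1).foldl
    (fun d i =>
      let job : List (String × String) :=
        [("title", "Job " ++ PySem.Int.toStr (i + 1)),
         ("company", "Company " ++ PySem.Int.toStr (i + 1)),
         ("location", "Location " ++ PySem.Int.toStr (i + 1))]
      let domain := PySem.List.pyGetD ["finance", "tech", "manufacturing"] (PySem.Int.mod i 3) ""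
      d.modify domain [] (fun l => l ++ [job]))
    job_openings
  final.items

-- ===== PORT B =====
def pvMkJob (i : Int) : List (String × String) :=
  [("title", "Job " ++ PySem.Int.toStr (i + 1)),
   ("company", "Company " ++ PySem.Int.toStr (i + 1)),
   ("location", "Location " ++ PySem.Int.toStr (i + 1))]

def create_dummy_job_openings_alt (num_jobs : Int) : List (String × List (List (String × String))) :=
  (PySem.List.enumerate ["finance", "tech", "manufacturing"] 0).map
    (fun p => (p.2, (PySem.List.pyRange p.1 num_jobs 3).map pvMkJob))

-- ===== PRECONDITION & SPEC =====
def Spec_create_dummy_job_openings (num_jobs : Int) (out : List (String × List (List (String × String)))) : Prop := out = create_dummy_job_openings_alt num_jobs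
instance (num_jobs : Int) (out : List (String × List (List (String × String)))) : Decidable (Spec_create_dummy_job_openings num_jobs out) := by unfold Spec_create_dummy_job_openings; infer_instance

-- ===== CLAIM (what is proved, stated in full; the proofs are below) =====
def Claim_equal_create_dummy_job_openings : Prop := ∀ (num_jobs : Int), Dom_create_dummy_job_openings num_jobs → Spec_create_dummy_job_openings num_jobs (create_dummy_job_openings num_jobs)

-- ===== LEMMAS AND PROOFS =====

-- A's loop body, named for the proof (definitionally the lambda in the port of A).
def pvStepA (d : PySem.Dict String (List (List (String × String)))) (i : Int) :
    PySem.Dict String (List (List (String × String))) :=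
  let job : List (String × String) :=
    [("title", "Job " ++ PySem.Int.toStr (i + 1)),
     ("company", "Company " ++ PySem.Int.toStr (i + 1)),
     ("location", "Location " ++ PySem.Int.toStr (i + 1))]
  let domain := PySem.List.pyGetD ["finance", "tech", "manufacturing"] (PySem.Int.mod i 3) ""
  d.modify domain [] (fun l => l ++ [job])

def pvJ (r : Int) (n : Int) : List (List (String × String)) :=
  (PySem.List.pyRange r n 3).map pvMkJob

-- one step of the strided range: range(r, n+1, 3) adds n iff n % 3 = r
theorem pvRange3_succ (r n : Nat) (hr : r < 3) :
    PySem.List.pyRange (r : Int) ((n : Int) + 1) 3 =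
      PySem.List.pyRange (r : Int) (n : Int) 3 ++ (if n % 3 = r then [(n : Int)] else []) := by
  rw [PySem.List.pyRange_of_pos _ _ (by norm_num : (0:Int) < 3),
      PySem.List.pyRange_of_pos _ _ (by norm_num : (0:Int) < 3)]
  by_cases h : n % 3 = r
  · have hc : (if (r : Int) < (n : Int) + 1 then (((n : Int) + 1 - r + 3 - 1) / 3).toNat else 0)
        = (n - r) / 3 + 1 := by
      split_ifs <;> omega
    have hc' : (if (r : Int) < (n : Int) then (((n : Int) - r + 3 - 1) / 3).toNat else 0)
        = (n - r) / 3 := by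
      split_ifs <;> omega
    rw [hc, hc', List.range_succ, List.map_append, if_pos h]
    refine congrArg₂ _ rfl ?_
    simp only [List.map_cons, List.map_nil, List.cons.injEq, and_true]
    omega
  · have hc : (if (r : Int) < (n : Int) + 1 then (((n : Int) + 1 - r + 3 - 1) / 3).toNat else 0)
        = (if (r : Int) < (n : Int) then (((n : Int) - r + 3 - 1) / 3).toNat else 0) := by
      split_ifs <;> omega
    rw [hc]
    simp [h]

theorem pvLoopA (n : Nat) :
    (PySem.List.pyRange 0 (n : Int) 1).foldl pvStepA
        (PySem.Dict.ofList [("finance", []), ("tech", []), ("manufacturing", [])])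
      = PySem.Dict.mk [("finance", pvJ 0 n), ("tech", pvJ 1 n), ("manufacturing", pvJ 2 n)] := by
  induction n with
  | zero =>
      simp [PySem.List.pyRange_one_eq_nil (by norm_num : (0:Int) ≤ 0)]
      decide
  | succ n ih =>
      have hcast : ((n + 1 : Nat) : Int) = (n : Int) + 1 := by push_cast; ring
      have hsplit : PySem.List.pyRange 0 ((n + 1 : Nat) : Int) 1
          = PySem.List.pyRange 0 (n : Int) 1 ++ [(n : Int)] := by
        rw [hcast]; exact PySem.List.pyRange_one_succ_right (by positivity)
      rw [hsplit, List.foldl_append, ih]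
      have hJ : ∀ r : Nat, r < 3 → pvJ (r : Int) ((n + 1 : Nat) : Int)
          = pvJ (r : Int) (n : Int) ++ (if n % 3 = r then [pvMkJob (n : Int)] else []) := by
        intro r hr
        unfold pvJ
        rw [hcast, pvRange3_succ r n hr, List.map_append]
        split_ifs <;> simp
      have hJ0 := hJ 0 (by norm_num)
      have hJ1 := hJ 1 (by norm_num)
      have hJ2 := hJ 2 (by norm_num)
      simp only [Nat.cast_zero, Nat.cast_one, Nat.cast_ofNat] at hJ0 hJ1 hJ2
      have h3 : n % 3 = 0 ∨ n % 3 = 1 ∨ n % 3 = 2 := by omega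
      simp only [List.foldl_cons, List.foldl_nil]
      rcases h3 with h | h | h <;>
        · have hm : ((n : Int).fmod 3) = ((n % 3 : Nat) : Int) := by
            rw [Int.fmod_eq_emod]
            simp
          rw [hJ0, hJ1, hJ2]
          simp [h, hm, pvStepA, pvMkJob, PySem.Int.mod, PySem.Dict.modify, PySem.Dict.insert, PySem.Dict.getD,
                PySem.Dict.get?, PySem.Dict.contains,
                PySem.List.pyGetD, PySem.List.pyGet?, PySem.List.pyIdx?]

-- ===== VERDICT (by name: the statement is the Claim_ definition above) =====
theorem create_dummy_job_openings_spec : Claim_equal_create_dummy_job_openings := by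
  intro num_jobs _
  unfold Spec_create_dummy_job_openings create_dummy_job_openings create_dummy_job_openings_alt
  by_cases hpos : 0 ≤ num_jobs
  · obtain ⟨n, rfl⟩ := Int.eq_ofNat_of_zero_le hpos
    have := pvLoopA n
    simp only [show (fun (d : PySem.Dict String (List (List (String × String)))) (i : Int) =>
        d.modify (PySem.List.pyGetD ["finance", "tech", "manufacturing"] (PySem.Int.mod i 3) "") []
          (fun l => l ++ [[("title", "Job " ++ PySem.Int.toStr (i + 1)),
            ("company", "Company " ++ PySem.Int.toStr (i + 1)),
            ("location", "Location " ++ PySem.Int.toStr (i + 1))]])) = pvStepA from rfl]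
    rw [this]
    simp [PySem.List.enumerate, pvJ]
  · have hneg : num_jobs < 0 := by omega
    have hA : PySem.List.pyRange 0 num_jobs 1 = [] :=
      PySem.List.pyRange_one_eq_nil (by omega)
    have hB : ∀ r : Int, 0 ≤ r → PySem.List.pyRange r num_jobs 3 = [] := by
      intro r hr
      rw [PySem.List.pyRange_of_pos _ _ (by norm_num : (0:Int) < 3), if_neg (by omega)]
      simp
    have e0 := hB 0 (by norm_num)
    have e1 := hB 1 (by norm_num)
    have e2 := hB 2 (by norm_num)
    rw [hA]
    simp [PySem.List.enumerate, e0, e1, e2]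
    decide
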